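-- pv_equiv track=rewrite | github.com/capreolina/rangifer_diary | 061/fubini.py | fubini_rec
-- ===== SOURCE A (Python) =====
-- from math import comb as choose
--
-- def fubini_rec(n):
--     """
--     Implements ``fubini`` using recursion, but memoises, in order to make the
--     performance (read: asymptotic runtime behaviour) reasonable.
--
--     <https://en.wikipedia.org/wiki/Dynamic_programming>
--     """
--
--     memo = {0: 1}
--
--     def a(m):
--         if m in memo:
--             return memo[m]
--
--         fubini_m = sum((choose(m, i) * a(m - i)) for i in range(1, m + 1))
--         memo[m] = fubini_m
--
--         return fubini_m
--
--     return a(n)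
-- ===== SOURCE B (Python) =====
-- from math import comb as choose
--
-- def fubini_rec(n):
--     if n < 0:
--         return 0
--     a = [1]
--     for m in range(1, n + 1):
--         a.append(sum(choose(m, i) * a[m - i] for i in range(1, m + 1)))
--     return a[n]
-- ===== Notes on version B (the rewrite author's own statement) =====
-- stated objective: simpler
-- what changed: Replaces the recursive closure with a shared memo dict by a straight bottom-up loop that fills a list a[0..n] in increasing order and returns a[n] (0 for negative n, matching A's empty-sum value).
import Mathlib
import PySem

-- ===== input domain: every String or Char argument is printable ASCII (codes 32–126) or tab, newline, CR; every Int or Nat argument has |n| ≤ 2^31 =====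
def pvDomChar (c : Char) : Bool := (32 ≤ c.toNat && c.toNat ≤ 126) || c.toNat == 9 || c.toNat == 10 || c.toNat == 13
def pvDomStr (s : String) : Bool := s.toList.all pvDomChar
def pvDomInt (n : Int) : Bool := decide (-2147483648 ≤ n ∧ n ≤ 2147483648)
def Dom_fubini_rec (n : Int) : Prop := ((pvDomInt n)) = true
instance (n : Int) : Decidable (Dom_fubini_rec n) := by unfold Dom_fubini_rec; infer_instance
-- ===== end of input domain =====

-- B replaces A's recursive closure + memo dict by a bottom-up loop filling a list a[0..n];
-- equal return values on every int input (for n < 0 both return 0, A via an empty sum).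

-- math.comb(m, i) for the nonnegative arguments both programs use it with
def choosePy (m i : Int) : Int := (Nat.choose m.toNat i.toNat : Int)

-- ===== PORT A =====
-- the inner closure `a(m)`, with the shared memo dict threaded through explicitly
def fubiniA (m : Int) (memo : PySem.Dict Int Int) : Int × PySem.Dict Int Int :=
  match PySem.Dict.get? memo m with
  | some v => (v, memo)
  | none =>
    let r := (PySem.List.pyRange 1 (m + 1) 1).attach.foldl
      (fun (acc : Int × PySem.Dict Int Int) i =>
        (acc.1 + choosePy m i.1 * (fubiniA (m - i.1) acc.2).1, (fubiniA (m - i.1) acc.2).2))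
      (0, memo)
    (r.1, r.2.insert m r.1)
termination_by m.toNat
decreasing_by
  have h := (PySem.List.mem_pyRange_one).1 i.2
  omega

def fubini_rec (n : Int) : Int :=
  (fubiniA n (PySem.Dict.empty.insert 0 1)).1

-- ===== PORT B =====
def fubini_rec_alt (n : Int) : Int :=
  if n < 0 then 0
  else
    let a := (PySem.List.pyRange 1 (n + 1) 1).foldl
      (fun a m =>
        a ++ [(PySem.List.pyRange 1 (m + 1) 1).foldl
          (fun s i => s + choosePy m i * PySem.List.pyGetD a (m - i) 0) 0])
      [1]
    PySem.List.pyGetD a n 0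

-- ===== PRECONDITION & SPEC =====
-- Pre_ keeps n below the depth at which A's recursive closure overflows CPython's recursion
-- limit and raises RecursionError; wherever A does return, it returns B's value.
def Pre_fubini_rec (n : Int) : Prop := n < 499
instance (n : Int) : Decidable (Pre_fubini_rec n) := by unfold Pre_fubini_rec; infer_instance
def pvWitness_fubini_rec : Int := 3

def Spec_fubini_rec (n : Int) (out : Int) : Prop := out = fubini_rec_alt n
instance (n : Int) (out : Int) : Decidable (Spec_fubini_rec n out) := by unfold Spec_fubini_rec; infer_instance

-- ===== CLAIM (what is proved, stated in full; the proofs are below) =====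
def Claim_equal_fubini_rec : Prop := ∀ (n : Int), Dom_fubini_rec n → Pre_fubini_rec n → Spec_fubini_rec n (fubini_rec n)

-- ===== LEMMAS AND PROOFS =====

-- the table B builds: tbl k = [a 0, …, a k]
def rowSum (m : Int) (a : List Int) : Int :=
  (PySem.List.pyRange 1 (m + 1) 1).foldl
    (fun s i => s + choosePy m i * PySem.List.pyGetD a (m - i) 0) 0

def tbl : Nat → List Int
  | 0 => [1]
  | k + 1 => tbl k ++ [rowSum ((k : Int) + 1) (tbl k)]

-- Fubini value on Nat, and its Int extension (0 for negatives)
def fubF (k : Nat) : Int := (tbl k).getD k 0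

def fubI (m : Int) : Int := if m < 0 then 0 else fubF m.toNat

lemma tbl_length (k : Nat) : (tbl k).length = k + 1 := by
  induction k with
  | zero => rfl
  | succ k ih => simp [tbl, ih]

lemma tbl_getD (j k : Nat) (h : j ≤ k) : (tbl k).getD j 0 = fubF j := by
  induction k with
  | zero =>
    interval_cases j
    rfl
  | succ k ih =>
    rcases Nat.lt_or_ge j (k + 1) with hj | hj
    · have hlen : j < (tbl k).length := by rw [tbl_length]; omega
      have : (tbl (k + 1)).getD j 0 = (tbl k).getD j 0 := by
        simp [tbl, List.getD, List.getElem?_append_left hlen]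
      rw [this, ih (by omega)]
    · have hj' : j = k + 1 := by omega
      subst hj'
      rfl

lemma tbl_pyGetD (k : Nat) (i : Int) (h0 : 0 ≤ i) (h1 : i ≤ (k : Int)) :
    PySem.List.pyGetD (tbl k) i 0 = fubI i := by
  have : i = ((i.toNat : Nat) : Int) := by omega
  rw [this, PySem.List.pyGetD_natCast, tbl_getD i.toNat k (by omega), fubI]
  simp only [if_neg (by omega : ¬ ((i.toNat : Int) : Int) < 0), Int.toNat_natCast]

-- the recurrence satisfied by fubF at a positive argument
lemma fubF_succ (k : Nat) :
    fubF (k + 1) =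
      (PySem.List.pyRange 1 ((k : Int) + 1 + 1) 1).foldl
        (fun s i => s + choosePy ((k : Int) + 1) i * fubI ((k : Int) + 1 - i)) 0 := by
  have hlast : fubF (k + 1) = rowSum ((k : Int) + 1) (tbl k) := by
    rw [fubF, show tbl (k + 1) = tbl k ++ [rowSum ((k : Int) + 1) (tbl k)] from rfl]
    simp [List.getD, tbl_length]
  rw [hlast, rowSum]
  apply PySem.List.foldl_congr_mem
  intro s i hi
  have hmem := (PySem.List.mem_pyRange_one).1 hi
  rw [tbl_pyGetD k ((k : Int) + 1 - i) (by omega) (by omega)]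

-- B's fold builds exactly tbl
lemma foldB_eq_tbl (k : Nat) :
    (PySem.List.pyRange 1 ((k : Int) + 1) 1).foldl
      (fun a m =>
        a ++ [(PySem.List.pyRange 1 (m + 1) 1).foldl
          (fun s i => s + choosePy m i * PySem.List.pyGetD a (m - i) 0) 0])
      [1] = tbl k := by
  induction k with
  | zero => simp [PySem.List.pyRange_one_eq_nil, tbl]
  | succ k ih =>
    have hsplit : PySem.List.pyRange 1 ((k : Int) + 1 + 1) 1
        = PySem.List.pyRange 1 ((k : Int) + 1) 1 ++ [(k : Int) + 1] := by
      have := PySem.List.pyRange_one_succ_right (a := 1) (b := (k : Int) + 1) (by omega)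
      simpa using this
    push_cast
    rw [hsplit, List.foldl_append, ih]
    simp [List.foldl, tbl, rowSum]

lemma alt_eq_fubI (n : Int) : fubini_rec_alt n = fubI n := by
  unfold fubini_rec_alt fubI
  split_ifs with h
  · rfl
  · have hn : n = ((n.toNat : Nat) : Int) := by omega
    rw [hn, foldB_eq_tbl n.toNat, PySem.List.pyGetD_natCast, tbl_getD n.toNat n.toNat le_rfl]
    rfl

-- ===== A-side correctness =====

def GoodMemo (memo : PySem.Dict Int Int) : Prop :=
  (∀ k v, memo.get? k = some v → v = fubI k) ∧ memo.get? 0 = some 1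

lemma goodMemo_insert {memo : PySem.Dict Int Int} (h : GoodMemo memo)
    (m : Int) (hm : m ≠ 0) (v : Int) (hv : v = fubI m) : GoodMemo (memo.insert m v) := by
  constructor
  · intro k w hk
    rcases eq_or_ne k m with rfl | hne
    · rw [PySem.Dict.get?_insert_self] at hk
      cases hk; exact hv
    · rw [PySem.Dict.get?_insert_of_ne _ _ hne] at hk
      exact h.1 k w hk
  · rw [PySem.Dict.get?_insert_of_ne _ _ (by omega)]
    exact h.2

-- attach.foldl unfolding: the body only uses the value
lemma foldl_attach_val {α β : Type} (l : List α) (f : β → α → β) (b : β) :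
    l.attach.foldl (fun acc x => f acc x.1) b = l.foldl f b := by
  conv_rhs => rw [← List.attach_map_subtype_val l]
  rw [List.foldl_map]

-- the A-side loop body, abbreviated
def stepA (m : Int) (acc : Int × PySem.Dict Int Int) (i : Int) : Int × PySem.Dict Int Int :=
  (acc.1 + choosePy m i * (fubiniA (m - i) acc.2).1, (fubiniA (m - i) acc.2).2)

lemma foldA_good (m : Int)
    (IH : ∀ i, 1 ≤ i → i ≤ m → ∀ memo, GoodMemo memo →
      (fubiniA (m - i) memo).1 = fubI (m - i) ∧ GoodMemo (fubiniA (m - i) memo).2) :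
    ∀ (l : List Int), (∀ i ∈ l, 1 ≤ i ∧ i ≤ m) → ∀ (s : Int) (memo : PySem.Dict Int Int),
      GoodMemo memo →
      (l.foldl (stepA m) (s, memo)).1 = s + (l.map (fun i => choosePy m i * fubI (m - i))).sum
      ∧ GoodMemo (l.foldl (stepA m) (s, memo)).2 := by
  intro l
  induction l with
  | nil => intro _ s memo h; simpa using h
  | cons x xs ihl =>
    intro hall s memo h
    have hx := hall x (by simp)
    obtain ⟨hv, hg⟩ := IH x hx.1 hx.2 memo h
    have := ihl (fun i hi => hall i (by simp [hi])) (s + choosePy m x * (fubiniA (m - x) memo).1)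
      (fubiniA (m - x) memo).2 hg
    rw [List.foldl_cons]
    refine ⟨?_, this.2⟩
    rw [show stepA m (s, memo) x
        = (s + choosePy m x * (fubiniA (m - x) memo).1, (fubiniA (m - x) memo).2) from rfl,
      this.1, hv]
    simp [List.sum_cons]
    ring

lemma attach_foldl_A (m : Int) (l : List Int) (b : Int × PySem.Dict Int Int) :
    l.attach.foldl
      (fun acc i =>
        (acc.1 + choosePy m i.1 * (fubiniA (m - i.1) acc.2).1, (fubiniA (m - i.1) acc.2).2)) b
      = l.foldl (stepA m) b :=
  foldl_attach_val l (stepA m) b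

lemma fubiniA_none (m : Int) (memo : PySem.Dict Int Int)
    (h : PySem.Dict.get? memo m = none) :
    fubiniA m memo =
      ((((PySem.List.pyRange 1 (m + 1) 1).foldl (stepA m) (0, memo)).1,
        (((PySem.List.pyRange 1 (m + 1) 1).foldl (stepA m) (0, memo)).2).insert m
          (((PySem.List.pyRange 1 (m + 1) 1).foldl (stepA m) (0, memo)).1))) := by
  rw [fubiniA, h, attach_foldl_A]

lemma fubiniA_good_of_IH (m : Int) (memo : PySem.Dict Int Int) (hgood : GoodMemo memo)
    (IH : ∀ i, 1 ≤ i → i ≤ m → ∀ memo, GoodMemo memo →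
      (fubiniA (m - i) memo).1 = fubI (m - i) ∧ GoodMemo (fubiniA (m - i) memo).2) :
    (fubiniA m memo).1 = fubI m ∧ GoodMemo (fubiniA m memo).2 := by
  cases h : PySem.Dict.get? memo m with
  | some v =>
    have : fubiniA m memo = (v, memo) := by rw [fubiniA, h]
    rw [this]
    exact ⟨hgood.1 m v h, hgood⟩
  | none =>
    have hm0 : m ≠ 0 := by
      intro hm; rw [hm, hgood.2] at h; cases h
    rw [fubiniA_none m memo h]
    by_cases hneg : m < 1
    · -- m < 0 here (m = 0 impossible): the range is empty, the sum is 0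
      have hnil : PySem.List.pyRange 1 (m + 1) 1 = [] :=
        PySem.List.pyRange_one_eq_nil (by omega)
      rw [hnil]
      have hfub : fubI m = 0 := by unfold fubI; rw [if_pos (by omega)]
      exact ⟨hfub.symm, goodMemo_insert hgood m hm0 0 hfub.symm⟩
    · have hpos : 1 ≤ m := by omega
      have hall : ∀ i ∈ PySem.List.pyRange 1 (m + 1) 1, 1 ≤ i ∧ i ≤ m := by
        intro i hi
        have := (PySem.List.mem_pyRange_one).1 hi
        omega
      obtain ⟨hval, hg⟩ := foldA_good m IH (PySem.List.pyRange 1 (m + 1) 1) hall 0 memo hgood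
      have hsum : (0 : Int) +
          ((PySem.List.pyRange 1 (m + 1) 1).map (fun i => choosePy m i * fubI (m - i))).sum
          = fubI m := by
        have hk : m = ((m.toNat - 1 : Nat) : Int) + 1 := by omega
        have hrec := fubF_succ (m.toNat - 1)
        rw [PySem.List.foldl_add] at hrec
        rw [show fubI m = fubF m.toNat by unfold fubI; rw [if_neg (by omega)],
          show m.toNat = (m.toNat - 1) + 1 by omega, hrec, ← hk]
      have hfold : (List.foldl (stepA m) (0, memo) (PySem.List.pyRange 1 (m + 1) 1)).1
          = fubI m := hval.trans hsum
      exact ⟨hfold, goodMemo_insert hg m hm0 _ hfold⟩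

lemma fubiniA_good : ∀ (m : Int) (memo : PySem.Dict Int Int), GoodMemo memo →
    (fubiniA m memo).1 = fubI m ∧ GoodMemo (fubiniA m memo).2 := by
  have main : ∀ (N : Nat) (m : Int), m.toNat ≤ N → ∀ memo, GoodMemo memo →
      (fubiniA m memo).1 = fubI m ∧ GoodMemo (fubiniA m memo).2 := by
    intro N
    induction N with
    | zero =>
      intro m hm memo hgood
      refine fubiniA_good_of_IH m memo hgood (fun i h1 h2 => ?_)
      exact absurd hm (by omega)
    | succ N ihN =>
      intro m hm memo hgood
      refine fubiniA_good_of_IH m memo hgood (fun i h1 h2 memo' hg' => ?_)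
      exact ihN (m - i) (by omega) memo' hg'
  intro m memo h
  exact main m.toNat m le_rfl memo h

-- ===== VERDICT (by name: the statement is the Claim_ definition above) =====
theorem fubini_rec_spec : Claim_equal_fubini_rec := by
  intro n _ _
  unfold Spec_fubini_rec fubini_rec
  rw [alt_eq_fubI]
  have hinit : GoodMemo (PySem.Dict.empty.insert 0 1) := by
    constructor
    · intro k v hk
      rcases eq_or_ne k 0 with rfl | hne
      · rw [PySem.Dict.get?_insert_self] at hk
        cases hk; rfl
      · rw [PySem.Dict.get?_insert_of_ne _ _ hne, PySem.Dict.get?_empty] at hk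
        cases hk
    · exact PySem.Dict.get?_insert_self _ _ _
  exact (fubiniA_good n _ hinit).1
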